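-- pv_equiv track=rewrite | github.com/OncoNLP/agent-pa-benchmark | gold_standard/parse_pa2.py | match_column
-- ===== SOURCE A (Python) =====
-- COLUMN_MAP = {
--     "kinase_gene": ["kinase gene", "kinase_gene", "kin_gene"],
--     "kinase_name": ["kinase common name", "kinase_name", "kin_name"],
--     "kinase_uniprot": ["kin_acc_id", "kinase_acc_id", "kinase_uniprot"],
--     "substrate_name": ["substrate common name", "substrate_name", "sub_name"],
--     "substrate_gene_id": ["sub_gene_id", "substrate_gene_id"],
--     "substrate_uniprot": ["sub_acc_id", "substrate_acc_id", "sub_uniprot"],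
--     "substrate_gene": ["substrate gene", "substrate_gene", "sub_gene"],
--     "phospho_site": ["sub_mod_rsd", "phospho_site", "site"],
--     "site_group_id": ["site_grp_id", "site_group_id"],
--     "heptameric_peptide": ["site_+/-7_aa", "site_7_aa", "heptameric_peptide", "peptide"],
--     "pa_version": [
--         "be aware",
--         "be aware: available in pa2_2023, or in pa1_2016_htkam2_only",
--         "version",
--         "pa_version",
--         "source",
--     ],
-- }
--
-- def match_column(header: str):
--     """Match a header string to a canonical column name.
--
--     Finds the BEST (longest matching variant) to avoid ambiguity
--     (e.g., 'site_grp_id' must match site_group_id, not phospho_site's 'site').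
--     """
--     h = header.strip().lower()
--     best_canonical = None
--     best_len = 0
--     for canonical, variants in COLUMN_MAP.items():
--         for v in variants:
--             if h == v:
--                 return canonical  # exact match wins immediately
--             if (v in h or h in v) and len(v) > best_len:
--                 best_canonical = canonical
--                 best_len = len(v)
--     return best_canonical
-- ===== SOURCE B (Python) =====
-- COLUMN_MAP = {
--     "kinase_gene": ["kinase gene", "kinase_gene", "kin_gene"],
--     "kinase_name": ["kinase common name", "kinase_name", "kin_name"],
--     "kinase_uniprot": ["kin_acc_id", "kinase_acc_id", "kinase_uniprot"],
--     "substrate_name": ["substrate common name", "substrate_name", "sub_name"],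
--     "substrate_gene_id": ["sub_gene_id", "substrate_gene_id"],
--     "substrate_uniprot": ["sub_acc_id", "substrate_acc_id", "sub_uniprot"],
--     "substrate_gene": ["substrate gene", "substrate_gene", "sub_gene"],
--     "phospho_site": ["sub_mod_rsd", "phospho_site", "site"],
--     "site_group_id": ["site_grp_id", "site_group_id"],
--     "heptameric_peptide": ["site_+/-7_aa", "site_7_aa", "heptameric_peptide", "peptide"],
--     "pa_version": [
--         "be aware",
--         "be aware: available in pa2_2023, or in pa1_2016_htkam2_only",
--         "version",
--         "pa_version",
--         "source",
--     ],
-- }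
--
-- def match_column(header: str):
--     h = header.strip().lower()
--     # pass 1: exact match wins, in map order
--     for canonical, variants in COLUMN_MAP.items():
--         if h in variants:
--             return canonical
--     # pass 2: longest substring-related variant; max() keeps the first maximal one
--     candidates = [(canonical, v)
--                   for canonical, variants in COLUMN_MAP.items()
--                   for v in variants
--                   if v in h or h in v]
--     if not candidates:
--         return None
--     return max(candidates, key=lambda cv: len(cv[1]))[0]
-- ===== Notes on version B (the rewrite author's own statement) =====
-- stated objective: simpler
-- what changed: Replaced the single interleaved loop carrying (best_canonical, best_len) accumulators by two passes: an exact-match scan in map order, then a candidate-list comprehension resolved with max(key=len), whose first-maximal rule reproduces the strict-> first-wins tie-break.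
import Mathlib
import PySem

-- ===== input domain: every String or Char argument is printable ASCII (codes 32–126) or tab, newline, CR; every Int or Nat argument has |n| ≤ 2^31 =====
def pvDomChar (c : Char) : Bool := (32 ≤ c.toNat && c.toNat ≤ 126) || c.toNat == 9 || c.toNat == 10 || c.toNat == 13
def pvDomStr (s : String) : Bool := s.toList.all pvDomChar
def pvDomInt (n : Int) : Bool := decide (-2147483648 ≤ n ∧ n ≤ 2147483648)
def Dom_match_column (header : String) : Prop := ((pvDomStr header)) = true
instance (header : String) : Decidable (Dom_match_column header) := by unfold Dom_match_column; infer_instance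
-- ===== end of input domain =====

-- B replaces A's interleaved best-tracking loop by an exact-match pass followed by a
-- candidate comprehension resolved with max(key=len) (first maximal = A's first-wins tie-break); objective: simpler.

-- shared module-level constant COLUMN_MAP (identical in Source A and Source B)
def columnMap : List (String × List String) :=
  [ ("kinase_gene", ["kinase gene", "kinase_gene", "kin_gene"]),
    ("kinase_name", ["kinase common name", "kinase_name", "kin_name"]),
    ("kinase_uniprot", ["kin_acc_id", "kinase_acc_id", "kinase_uniprot"]),
    ("substrate_name", ["substrate common name", "substrate_name", "sub_name"]),
    ("substrate_gene_id", ["sub_gene_id", "substrate_gene_id"]),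
    ("substrate_uniprot", ["sub_acc_id", "substrate_acc_id", "sub_uniprot"]),
    ("substrate_gene", ["substrate gene", "substrate_gene", "sub_gene"]),
    ("phospho_site", ["sub_mod_rsd", "phospho_site", "site"]),
    ("site_group_id", ["site_grp_id", "site_group_id"]),
    ("heptameric_peptide", ["site_+/-7_aa", "site_7_aa", "heptameric_peptide", "peptide"]),
    ("pa_version",
      [ "be aware",
        "be aware: available in pa2_2023, or in pa1_2016_htkam2_only",
        "version",
        "pa_version",
        "source"]) ]

-- ===== PORT A =====
-- inner 'for v in variants': Sum.inl = the early 'return canonical', Sum.inr = the running (best_canonical, best_len)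
def mcVars (h c : String) : List String → Option String × Int → (String ⊕ (Option String × Int))
  | [], acc => Sum.inr acc
  | v :: vs, (best, bestLen) =>
    if h == v then Sum.inl c
    else if (PySem.Str.isIn v h || PySem.Str.isIn h v) && decide (bestLen < PySem.Str.len v) then
      mcVars h c vs (some c, PySem.Str.len v)
    else
      mcVars h c vs (best, bestLen)

-- outer 'for canonical, variants in COLUMN_MAP.items()'
def mcOuter (h : String) : List (String × List String) → Option String × Int → Option String
  | [], acc => acc.1
  | (c, vs) :: rest, acc =>
    match mcVars h c vs acc with
    | Sum.inl r => some r
    | Sum.inr acc' => mcOuter h rest acc'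

def match_column (header : String) : Option String :=
  mcOuter (PySem.Str.lower (PySem.Str.strip header)) columnMap (none, 0)

-- ===== PORT B =====
-- the 'candidates' comprehension of Source B, over a map m
def candsOf (h : String) (m : List (String × List String)) : List (String × String) :=
  m.flatMap (fun p => (p.2.filter (fun v => PySem.Str.isIn v h || PySem.Str.isIn h v)).map (fun v => (p.1, v)))

-- body of Source B after 'h = header.strip().lower()': exact pass, then candidates + max(key=len)
def mcAlt (h : String) : Option String :=
  match columnMap.find? (fun p => p.2.contains h) with
  | some p => some p.1
  | none =>
    match PySem.List.max? (candsOf h columnMap) (fun cv => PySem.Str.len cv.2) with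
    | some cv => some cv.1
    | none => none

def match_column_alt (header : String) : Option String :=
  mcAlt (PySem.Str.lower (PySem.Str.strip header))

-- ===== PRECONDITION & SPEC =====
def Spec_match_column (header : String) (out : Option String) : Prop := out = match_column_alt header
instance (header : String) (out : Option String) : Decidable (Spec_match_column header out) := by unfold Spec_match_column; infer_instance

-- ===== CLAIM (what is proved, stated in full; the proofs are below) =====
def Claim_equal_match_column : Prop := ∀ (header : String), Dom_match_column header → Spec_match_column header (match_column header)

-- ===== LEMMAS AND PROOFS =====

-- A's inner update on one (already substring-filtered) candidate
def stepA (acc : Option String × Int) (cv : String × String) : Option String × Int :=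
  if acc.2 < PySem.Str.len cv.2 then (some cv.1, PySem.Str.len cv.2) else acc

-- the folding step of PySem.List.max? with key = len of the variant
def stepM (o : Option (String × String)) (cv : String × String) : Option (String × String) :=
  match o with
  | none => some cv
  | some m => if PySem.Str.len m.2 < PySem.Str.len cv.2 then some cv else some m

-- correspondence between A's (best_canonical, best_len) and max?'s running best candidate
def mcInv (s : Option String × Int) (o : Option (String × String)) : Prop :=
  match o with
  | none => s = (none, 0)
  | some cv => s.1 = some cv.1 ∧ s.2 = PySem.Str.len cv.2

lemma mcVars_exact (h c : String) (vs : List String) (acc : Option String × Int)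
    (hmem : h ∈ vs) : mcVars h c vs acc = Sum.inl c := by
  induction vs generalizing acc with
  | nil => simp at hmem
  | cons v vt ih =>
    obtain ⟨b, l⟩ := acc
    by_cases he : h = v
    · simp [mcVars, he]
    · have hrest : h ∈ vt := by
        rcases List.mem_cons.mp hmem with h' | h'
        · exact absurd h' he
        · exact h'
      simp only [mcVars, beq_iff_eq, he, if_false]
      split <;> exact ih _ hrest

lemma mcVars_no_exact (h c : String) (vs : List String) (acc : Option String × Int)
    (hmem : h ∉ vs) :
    mcVars h c vs acc =
      Sum.inr (((vs.filter (fun v => PySem.Str.isIn v h || PySem.Str.isIn h v)).map (fun v => (c, v))).foldl stepA acc) := by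
  induction vs generalizing acc with
  | nil => rfl
  | cons v vt ih =>
    obtain ⟨b, l⟩ := acc
    have he : ¬ h = v := fun h' => hmem (h' ▸ List.mem_cons_self)
    have hrest : h ∉ vt := fun h' => hmem (List.mem_cons_of_mem _ h')
    simp only [mcVars, beq_iff_eq, he, if_false]
    by_cases hsub : (PySem.Str.isIn v h || PySem.Str.isIn h v) = true
    · simp only [List.filter_cons, hsub, if_true, List.map_cons, List.foldl_cons]
      by_cases hlen : l < PySem.Str.len v
      · rw [if_pos (by simp only [Bool.true_and, decide_eq_true_eq]; exact hlen)]
        rw [ih _ hrest]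
        have : stepA (b, l) (c, v) = (some c, PySem.Str.len v) := by
          simp only [stepA]; rw [if_pos]; exact_mod_cast hlen
        rw [this]
      · rw [if_neg (by simp only [Bool.and_eq_true, decide_eq_true_eq]; exact fun hc => hlen hc.2)]
        rw [ih _ hrest]
        have : stepA (b, l) (c, v) = (b, l) := by
          simp only [stepA]; rw [if_neg]; intro hc; exact hlen (by exact_mod_cast hc)
        rw [this]
    · simp only [Bool.not_eq_true] at hsub
      simp only [List.filter_cons, hsub, Bool.false_and]
      exact ih _ hrest

lemma mcOuter_eq (h : String) (m : List (String × List String)) (acc : Option String × Int) :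
    mcOuter h m acc =
      match m.find? (fun p => p.2.contains h) with
      | some p => some p.1
      | none => ((candsOf h m).foldl stepA acc).1 := by
  induction m generalizing acc with
  | nil => simp [mcOuter, candsOf]
  | cons p rest ih =>
    obtain ⟨c, vs⟩ := p
    by_cases hex : h ∈ vs
    · rw [List.find?_cons_of_pos (by simpa using hex)]
      simp only [mcOuter, mcVars_exact h c vs acc hex]
    · rw [List.find?_cons_of_neg (by simpa using hex)]
      simp only [mcOuter, mcVars_no_exact h c vs acc hex]
      rw [ih]
      cases rest.find? (fun p => p.2.contains h) <;> simp [candsOf, List.foldl_append]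

lemma mcInv_step (s : Option String × Int) (o : Option (String × String)) (cv : String × String)
    (hinv : mcInv s o) (hne : cv.2 ≠ "") : mcInv (stepA s cv) (stepM o cv) := by
  have hpos : 0 < PySem.Str.len cv.2 := by
    have hnil : cv.2.toList ≠ [] := by simp [String.toList_eq_nil_iff, hne]
    have := List.length_pos_of_ne_nil hnil
    simp only [PySem.Str.len]
    exact_mod_cast this
  match o with
  | none =>
    simp only [mcInv] at hinv
    subst hinv
    show mcInv (if (0:Int) < PySem.Str.len cv.2 then (some cv.1, PySem.Str.len cv.2) else (none, 0)) (some cv)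
    rw [if_pos hpos]
    exact ⟨rfl, rfl⟩
  | some m =>
    obtain ⟨b, l⟩ := s
    obtain ⟨h1, h2⟩ := hinv
    simp only at h1 h2
    subst h1 h2
    by_cases hlt : PySem.Str.len m.2 < PySem.Str.len cv.2
    · show mcInv (if PySem.Str.len m.2 < PySem.Str.len cv.2 then (some cv.1, PySem.Str.len cv.2) else (some m.1, PySem.Str.len m.2)) _
      rw [if_pos hlt]
      simp only [stepM]
      rw [if_pos hlt]
      exact ⟨rfl, rfl⟩
    · show mcInv (if PySem.Str.len m.2 < PySem.Str.len cv.2 then (some cv.1, PySem.Str.len cv.2) else (some m.1, PySem.Str.len m.2)) _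
      rw [if_neg hlt]
      simp only [stepM]
      rw [if_neg hlt]
      exact ⟨rfl, rfl⟩

lemma mcInv_foldl (cs : List (String × String)) :
    ∀ (s : Option String × Int) (o : Option (String × String)),
    mcInv s o → (∀ cv ∈ cs, cv.2 ≠ "") → mcInv (cs.foldl stepA s) (cs.foldl stepM o) := by
  induction cs with
  | nil => intro s o hinv _; simpa using hinv
  | cons cv ct ih =>
    intro s o hinv hne
    simp only [List.foldl_cons]
    exact ih _ _ (mcInv_step s o cv hinv (hne cv (by simp))) (fun x hx => hne x (by simp [hx]))

lemma mcInv_out (s : Option String × Int) (o : Option (String × String)) (hinv : mcInv s o) :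
    s.1 = o.map Prod.fst := by
  match o with
  | none => simp only [mcInv] at hinv; subst hinv; rfl
  | some m => simp [hinv.1]

lemma vars_ne_empty : ∀ p ∈ columnMap, ∀ v ∈ p.2, v ≠ "" := by decide

lemma cands_ne_empty (h : String) : ∀ cv ∈ candsOf h columnMap, cv.2 ≠ "" := by
  intro cv hcv
  simp only [candsOf, List.mem_flatMap, List.mem_map, List.mem_filter] at hcv
  obtain ⟨p, hp, v, ⟨hv, _⟩, rfl⟩ := hcv
  exact vars_ne_empty p hp v hv

lemma max?_eq_foldl_stepM (cs : List (String × String)) :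
    PySem.List.max? cs (fun cv => PySem.Str.len cv.2) = cs.foldl stepM none := by
  unfold PySem.List.max?
  congr 1
  funext o cv
  cases o <;> rfl

lemma main_eq (h : String) : mcOuter h columnMap (none, (0 : Int)) = mcAlt h := by
  unfold mcAlt
  rw [mcOuter_eq]
  cases hfind : columnMap.find? (fun p => p.2.contains h) with
  | some p => rfl
  | none =>
    dsimp only
    rw [max?_eq_foldl_stepM]
    rw [mcInv_out _ _ (mcInv_foldl (candsOf h columnMap) (none, 0) none rfl (cands_ne_empty h))]
    cases (candsOf h columnMap).foldl stepM none <;> rfl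

-- ===== VERDICT (by name: the statement is the Claim_ definition above) =====
theorem match_column_spec : Claim_equal_match_column := by
  intro header _
  unfold Spec_match_column match_column match_column_alt
  exact main_eq (PySem.Str.lower (PySem.Str.strip header))
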